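-- pv_equiv track=rewrite | github.com/myvogueai/myvogue-backend | main.py | fallback_description
-- ===== SOURCE A (Python) =====
-- def fallback_description(parts: list[str], lang: str) -> str:
--     cleaned = [str(p).strip() for p in parts if p and str(p).strip()]
--
--     def simplify_it(part: str) -> str:
--         p = part.strip()
--
--         replacements = [
--             ("pezzo unico:", ""),
--             ("top:", ""),
--             ("bottom:", ""),
--             ("strato:", ""),
--             ("scarpe:", ""),
--         ]
--         for old, new in replacements:
--             p = p.replace(old, new).strip()
--
--         words = p.split()
--         if len(words) >= 2 and words[-1].lower() == words[-2].lower():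
--             p = " ".join(words[:-1])
--
--         return p.strip()
--
--     cleaned = [simplify_it(p) for p in cleaned if simplify_it(p)]
--
--     if not cleaned:
--         if lang == "en":
--             return "Well-balanced outfit."
--         if lang == "es":
--             return "Outfit equilibrado."
--         return "Outfit ben bilanciato."
--
--     if lang == "en":
--         return "Outfit with " + ", ".join(cleaned[:-1]) + (" and " + cleaned[-1] if len(cleaned) > 1 else cleaned[0]) + "."
--     if lang == "es":
--         return "Outfit con " + ", ".join(cleaned[:-1]) + (" y " + cleaned[-1] if len(cleaned) > 1 else cleaned[0]) + "."
--
--     if len(cleaned) == 1: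
--         return f"Outfit con {cleaned[0]}."
--     if len(cleaned) == 2:
--         return f"Outfit con {cleaned[0]} e {cleaned[1]}."
--     return f"Outfit con {', '.join(cleaned[:-1])} e {cleaned[-1]}."
-- ===== SOURCE B (Python) =====
-- _STYLE = {
--     "en": (" and ", "Outfit with ", "Well-balanced outfit."),
--     "es": (" y ", "Outfit con ", "Outfit equilibrado."),
-- }
-- _IT = (" e ", "Outfit con ", "Outfit ben bilanciato.")
--
--
-- def _simplify(part):
--     p = part.strip()
--     for tag in ("pezzo unico:", "top:", "bottom:", "strato:", "scarpe:"):
--         p = p.replace(tag, "").strip()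
--     words = p.split()
--     if len(words) >= 2 and words[-1].lower() == words[-2].lower():
--         p = " ".join(words[:-1])
--     return p.strip()
--
--
-- def fallback_description(parts, lang):
--     conj, prefix, empty = _STYLE.get(lang, _IT)
--     # One backward pass collecting the sentence pieces right-to-left: the last kept
--     # item first, the conjunction before the second-to-last, ", " before the rest.
--     # No cleaned list, no slicing, no ", ".join of it: the final sentence is the
--     # one-shot concatenation of the collected pieces.
--     segs = []
--     count = 0
--     for p in reversed(parts):
--         s = _simplify(p)
--         if not s:
--             continue
--         if count == 1:
--             segs.append(conj)
--         elif count > 1: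
--             segs.append(", ")
--         segs.append(s)
--         count += 1
--     if not segs:
--         return empty
--     segs.append(prefix)
--     segs.reverse()
--     segs.append(".")
--     return "".join(segs)
-- ===== Notes on version B (the rewrite author's own statement) =====
-- stated objective: faster
-- what changed: Instead of A's staged passes (two filtering comprehensions that call the cleaning helper twice per element to build a cleaned list, then language-branch cascades that slice, ', '.join and index that list), B makes one backward pass over the parts, cleaning each element once and collecting the sentence pieces (items and connectors: the conjunction before the second-to-last kept item, ', ' before earlier ones) into a flat segment list that is reversed and concatenated once; connectors/empty message come from a per-language table with Italian default.
import Mathlib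
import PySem

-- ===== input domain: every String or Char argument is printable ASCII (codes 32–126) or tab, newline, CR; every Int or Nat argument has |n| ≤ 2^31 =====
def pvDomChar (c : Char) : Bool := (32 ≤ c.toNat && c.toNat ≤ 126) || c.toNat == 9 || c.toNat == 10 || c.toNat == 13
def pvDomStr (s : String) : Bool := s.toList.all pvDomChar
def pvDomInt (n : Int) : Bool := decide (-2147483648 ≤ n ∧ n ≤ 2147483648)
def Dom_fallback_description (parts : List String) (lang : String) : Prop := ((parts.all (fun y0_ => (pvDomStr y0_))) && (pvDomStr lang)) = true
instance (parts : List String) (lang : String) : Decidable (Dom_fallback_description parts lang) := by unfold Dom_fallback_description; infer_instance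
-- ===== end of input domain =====

-- B replaces A's staged passes (two filtering comprehensions building a cleaned list,
-- then per-language branch cascades that slice/join/index it) by ONE backward
-- pass that collects the sentence pieces (items and connectors) right-to-left and
-- concatenates them once at the end; same results.

-- ===== PORT A =====
def simplify_it (part : String) : String :=
  let p := PySem.Str.strip part
  let p := [("pezzo unico:", ""), ("top:", ""), ("bottom:", ""), ("strato:", ""), ("scarpe:", "")].foldl
      (fun p on => PySem.Str.strip (PySem.Str.replace p on.1 on.2)) p
  let words := PySem.Str.split₀ p
  -- words[-1]/words[-2] are only read when len(words) >= 2, so the defaults are unreachable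
  let p := if 2 ≤ words.length &&
      (PySem.Str.lower (PySem.List.pyGetD words (-1) "") == PySem.Str.lower (PySem.List.pyGetD words (-2) "")) then
      PySem.Str.join " " (PySem.List.slice words none (some (-1)))
    else p
  PySem.Str.strip p

def fallback_description (parts : List String) (lang : String) : String :=
  let cleaned := (parts.filter (fun p => !(p == "") && !(PySem.Str.strip p == ""))).map
      (fun p => PySem.Str.strip p)
  let cleaned := (cleaned.filter (fun p => !(simplify_it p == ""))).map (fun p => simplify_it p)
  if cleaned == [] then
    if lang == "en" then "Well-balanced outfit."
    else if lang == "es" then "Outfit equilibrado."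
    else "Outfit ben bilanciato."
  -- cleaned[-1]/cleaned[0]/cleaned[1] are only read when cleaned is long enough: defaults unreachable
  else if lang == "en" then
    "Outfit with " ++ PySem.Str.join ", " (PySem.List.slice cleaned none (some (-1))) ++
      (if 1 < cleaned.length then " and " ++ PySem.List.pyGetD cleaned (-1) "" else PySem.List.pyGetD cleaned 0 "") ++ "."
  else if lang == "es" then
    "Outfit con " ++ PySem.Str.join ", " (PySem.List.slice cleaned none (some (-1))) ++
      (if 1 < cleaned.length then " y " ++ PySem.List.pyGetD cleaned (-1) "" else PySem.List.pyGetD cleaned 0 "") ++ "."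
  else if cleaned.length == 1 then
    "Outfit con " ++ PySem.List.pyGetD cleaned 0 "" ++ "."
  else if cleaned.length == 2 then
    "Outfit con " ++ PySem.List.pyGetD cleaned 0 "" ++ " e " ++ PySem.List.pyGetD cleaned 1 "" ++ "."
  else
    "Outfit con " ++ PySem.Str.join ", " (PySem.List.slice cleaned none (some (-1))) ++ " e " ++
      PySem.List.pyGetD cleaned (-1) "" ++ "."

-- ===== PORT B =====
def pvStyle : PySem.Dict String (String × String × String) :=
  (PySem.Dict.empty.insert "en" (" and ", "Outfit with ", "Well-balanced outfit.")).insert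
    "es" (" y ", "Outfit con ", "Outfit equilibrado.")

def pvIT : String × String × String := (" e ", "Outfit con ", "Outfit ben bilanciato.")

def simplify_alt (part : String) : String :=
  let p := PySem.Str.strip part
  let p := ["pezzo unico:", "top:", "bottom:", "strato:", "scarpe:"].foldl
      (fun p tag => PySem.Str.strip (PySem.Str.replace p tag "")) p
  let words := PySem.Str.split₀ p
  -- words[-1]/words[-2] are only read when len(words) >= 2, so the defaults are unreachable
  let p := if 2 ≤ words.length &&
      (PySem.Str.lower (PySem.List.pyGetD words (-1) "") == PySem.Str.lower (PySem.List.pyGetD words (-2) "")) then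
      PySem.Str.join " " (PySem.List.slice words none (some (-1)))
    else p
  PySem.Str.strip p

def fallback_description_alt (parts : List String) (lang : String) : String :=
  let e := pvStyle.getD lang pvIT
  -- one backward pass ('for p in reversed(parts)'), accumulator (segs, count)
  let st := parts.reverse.foldl
      (fun (st : List String × Nat) p =>
        let s := simplify_alt p
        if s == "" then st
        else
          let segs := if st.2 == 1 then st.1 ++ [e.1]
            else if 1 < st.2 then st.1 ++ [", "] else st.1
          (segs ++ [s], st.2 + 1))
      ([], 0)
  if st.1 == [] then e.2.2
  else PySem.Str.join "" ((st.1 ++ [e.2.1]).reverse ++ ["."])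

-- ===== PRECONDITION & SPEC =====
def Spec_fallback_description (parts : List String) (lang : String) (out : String) : Prop := out = fallback_description_alt parts lang
instance (parts : List String) (lang : String) (out : String) : Decidable (Spec_fallback_description parts lang out) := by unfold Spec_fallback_description; infer_instance

-- ===== CLAIM =====
def Claim_equal_fallback_description : Prop := ∀ (parts : List String) (lang : String), Dom_fallback_description parts lang → Spec_fallback_description parts lang (fallback_description parts lang)

-- ===== LEMMAS AND PROOFS =====

-- proof-only helpers
def pvCleanA (parts : List String) : List String :=
  (((parts.filter (fun p => !(p == "") && !(PySem.Str.strip p == ""))).map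
      (fun p => PySem.Str.strip p)).filter (fun p => !(simplify_it p == ""))).map
    (fun p => simplify_it p)

def pvBodyA (cleaned : List String) (lang : String) : String :=
  if cleaned == [] then
    if lang == "en" then "Well-balanced outfit."
    else if lang == "es" then "Outfit equilibrado."
    else "Outfit ben bilanciato."
  else if lang == "en" then
    "Outfit with " ++ PySem.Str.join ", " (PySem.List.slice cleaned none (some (-1))) ++
      (if 1 < cleaned.length then " and " ++ PySem.List.pyGetD cleaned (-1) "" else PySem.List.pyGetD cleaned 0 "") ++ "."
  else if lang == "es" then
    "Outfit con " ++ PySem.Str.join ", " (PySem.List.slice cleaned none (some (-1))) ++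
      (if 1 < cleaned.length then " y " ++ PySem.List.pyGetD cleaned (-1) "" else PySem.List.pyGetD cleaned 0 "") ++ "."
  else if cleaned.length == 1 then
    "Outfit con " ++ PySem.List.pyGetD cleaned 0 "" ++ "."
  else if cleaned.length == 2 then
    "Outfit con " ++ PySem.List.pyGetD cleaned 0 "" ++ " e " ++ PySem.List.pyGetD cleaned 1 "" ++ "."
  else
    "Outfit con " ++ PySem.Str.join ", " (PySem.List.slice cleaned none (some (-1))) ++ " e " ++
      PySem.List.pyGetD cleaned (-1) "" ++ "."

-- the core string B's backward pass builds, as a structural recursion on the cleaned list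
def pvCore (conj : String) : List String → Option String
  | [] => none
  | [x] => some x
  | [x, y] => some (x ++ conj ++ y)
  | x :: y :: z :: t =>
    match pvCore conj (y :: z :: t) with
    | none => none
    | some c => some (x ++ ", " ++ c)

def pvSegs (conj : String) : List String → List String
  | [] => []
  | [x] => [x]
  | x :: y :: t => pvSegs conj (y :: t) ++ [if t = [] then conj else ", ", x]

def pvStep (conj : String) (st : List String × Nat) (s : String) : List String × Nat :=
  ((if st.2 == 1 then st.1 ++ [conj] else if 1 < st.2 then st.1 ++ [", "] else st.1) ++ [s],
    st.2 + 1)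

lemma pv_dropWhile_idem {α : Type} (p : α → Bool) (l : List α) :
    List.dropWhile p (List.dropWhile p l) = List.dropWhile p l := by
  induction l with
  | nil => simp
  | cons a t ih => by_cases h : p a <;> simp [h, ih]

lemma pv_dropWhile_eq_self_of_prefix {α : Type} (p : α → Bool) {s t : List α}
    (hp : s <+: t) (ht : List.dropWhile p t = t) : List.dropWhile p s = s := by
  cases s with
  | nil => simp
  | cons a s' =>
    obtain ⟨r, hr⟩ := hp
    rw [List.cons_append] at hr
    subst hr
    by_cases h : p a
    · exfalso
      rw [List.dropWhile_cons_of_pos h] at ht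
      have h1 := List.length_dropWhile_le p (s' ++ r)
      have h2 := congrArg List.length ht
      simp [List.length_append] at h1 h2
      omega
    · simp [List.dropWhile_cons_of_neg h]

lemma pv_chars_strip_idem (cs : List Char) :
    PySem.Chars.strip (PySem.Chars.strip cs) = PySem.Chars.strip cs := by
  simp only [PySem.Chars.strip, PySem.Chars.lstrip, PySem.Chars.rstrip]
  set t := List.dropWhile PySem.Chars.isspace cs with ht
  set x := List.dropWhile PySem.Chars.isspace t.reverse with hx
  have htc : List.dropWhile PySem.Chars.isspace t = t := pv_dropWhile_idem _ _
  have hxr : x.reverse <+: t := by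
    rw [← List.reverse_suffix, List.reverse_reverse]
    exact List.dropWhile_suffix _
  have h1 : List.dropWhile PySem.Chars.isspace x.reverse = x.reverse :=
    pv_dropWhile_eq_self_of_prefix _ hxr htc
  rw [h1, List.reverse_reverse, pv_dropWhile_idem]

lemma pv_strip_idem (s : String) : PySem.Str.strip (PySem.Str.strip s) = PySem.Str.strip s := by
  rw [← String.toList_inj]
  simp [pv_chars_strip_idem]

lemma pv_simplify_eq (p : String) : simplify_it (PySem.Str.strip p) = simplify_alt p := by
  unfold simplify_it simplify_alt
  simp only [List.foldl_cons, List.foldl_nil, pv_strip_idem]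
  rfl

lemma pv_strip_empty : PySem.Str.strip "" = "" := by decide

set_option maxRecDepth 4096 in
lemma pv_simplify_it_empty : simplify_it "" = "" := by decide

lemma pv_simplify_alt_of_strip_empty (p : String) (h : PySem.Str.strip p = "") :
    simplify_alt p = "" := by
  rw [← pv_simplify_eq, h, pv_simplify_it_empty]

lemma pv_cleanA_eq (parts : List String) :
    pvCleanA parts = (parts.map simplify_alt).filter (fun s => !(s == "")) := by
  induction parts with
  | nil => rfl
  | cons p t ih =>
    by_cases h : simplify_alt p = ""
    · have hA : pvCleanA (p :: t) = pvCleanA t := by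
        unfold pvCleanA
        simp only [List.filter_cons]
        by_cases hc : (!(p == "") && !(PySem.Str.strip p == "")) = true
        · rw [if_pos hc]
          simp only [List.map_cons, List.filter_cons]
          rw [if_neg (by simp [pv_simplify_eq, h])]
        · rw [if_neg hc]
      rw [hA, ih]
      simp [h]
    · have hsp : ¬ PySem.Str.strip p = "" := fun hc => h (pv_simplify_alt_of_strip_empty p hc)
      have hp : ¬ p = "" := by intro hc; subst hc; exact hsp pv_strip_empty
      have hA : pvCleanA (p :: t) = simplify_alt p :: pvCleanA t := by
        unfold pvCleanA
        simp only [List.filter_cons]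
        rw [if_pos (by simp [hp, hsp])]
        simp only [List.map_cons, List.filter_cons]
        rw [if_pos (by simp [pv_simplify_eq, h]), List.map_cons, pv_simplify_eq]
      rw [hA, ih]
      simp [h]

-- B's raw fold equals the fold of pvStep over the simplified-and-filtered list
lemma pv_fold_filter (conj : String) (l : List String) (init : List String × Nat) :
    l.foldl
        (fun (st : List String × Nat) p =>
          let s := simplify_alt p
          if s == "" then st
          else
            let segs := if st.2 == 1 then st.1 ++ [conj]
              else if 1 < st.2 then st.1 ++ [", "] else st.1
            (segs ++ [s], st.2 + 1))
        init
      = ((l.map simplify_alt).filter (fun s => !(s == ""))).foldl (pvStep conj) init := by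
  induction l generalizing init with
  | nil => simp
  | cons p t ih =>
    by_cases h : simplify_alt p = ""
    · have h1 : (simplify_alt p == "") = true := by simp [h]
      simp only [List.foldl_cons, List.map_cons, List.filter_cons, h1, if_true,
        Bool.not_true]
      exact ih init
    · have h1 : (simplify_alt p == "") = false := by simp [h]
      simp only [List.foldl_cons, List.map_cons, List.filter_cons, h1, Bool.not_false,
        if_true]
      exact ih _

lemma pv_foldr_segs (conj : String) (c : List String) :
    c.foldr (fun s st => pvStep conj st s) ([], 0) = (pvSegs conj c, c.length) := by
  induction c with
  | nil => rfl
  | cons x t ih =>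
    rw [List.foldr_cons, ih]
    cases t with
    | nil => rfl
    | cons y u =>
      cases u with
      | nil => simp [pvStep, pvSegs]
      | cons z v => simp [pvStep, pvSegs]

lemma pv_segs_ne_nil (conj x : String) (t : List String) : pvSegs conj (x :: t) ≠ [] := by
  cases t <;> simp [pvSegs]

-- Str-level join lemmas
lemma pv_join_nil (sep : String) : PySem.Str.join sep [] = "" := by
  rw [← String.toList_inj]
  simp [PySem.Str.toList_join, PySem.Chars.join_nil]

lemma pv_join_singleton (sep s : String) : PySem.Str.join sep [s] = s := by
  rw [← String.toList_inj]
  simp [PySem.Str.toList_join, PySem.Chars.join_singleton]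

lemma pv_join_cons₂ (sep a b : String) (t : List String) :
    PySem.Str.join sep (a :: b :: t) = a ++ sep ++ PySem.Str.join sep (b :: t) := by
  rw [← String.toList_inj]
  simp [PySem.Str.toList_join, PySem.Chars.join_cons_cons]

lemma pv_join_empty_cons (a : String) (t : List String) :
    PySem.Str.join "" (a :: t) = a ++ PySem.Str.join "" t := by
  cases t with
  | nil => rw [pv_join_singleton, pv_join_nil]; simp
  | cons b u => rw [pv_join_cons₂]; simp

lemma pv_join_empty_append_dot (l : List String) :
    PySem.Str.join "" (l ++ ["."]) = PySem.Str.join "" l ++ "." := by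
  induction l with
  | nil => rw [pv_join_nil]; simp [pv_join_singleton]
  | cons a t ih =>
    rw [List.cons_append, pv_join_empty_cons, pv_join_empty_cons, ih]
    simp [String.append_assoc]

lemma pv_slice_dropLast (xs : List String) :
    PySem.List.slice xs none (some (-1)) = xs.dropLast := by
  simp [pysem]

lemma pv_getD_last (x : String) (t : List String) :
    PySem.List.pyGetD (x :: t) (-1) "" = (x :: t).getLast (by simp) := by
  simp [PySem.List.pyGetD, PySem.List.pyGet?, PySem.List.pyIdx?, List.getLast_eq_getElem]
  rfl

-- the core equals A's "join of dropLast + connector + last" sentence, for nonempty lists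
lemma pv_core_sentence (conj : String) (c : List String) (h : c ≠ []) :
    pvCore conj c = some (PySem.Str.join ", " (PySem.List.slice c none (some (-1))) ++
      (if 1 < c.length then conj ++ PySem.List.pyGetD c (-1) "" else PySem.List.pyGetD c 0 "")) := by
  induction c with
  | nil => exact absurd rfl h
  | cons x t ih =>
    cases t with
    | nil =>
      simp [pvCore, pv_slice_dropLast, pv_join_nil, PySem.List.pyGetD, PySem.List.pyGet?,
        PySem.List.pyIdx?]
    | cons y u =>
      cases u with
      | nil =>
        simp [pvCore, pv_slice_dropLast, pv_join_singleton, pv_getD_last,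
          String.append_assoc]
      | cons z v =>
        rw [show pvCore conj (x :: y :: z :: v) =
            match pvCore conj (y :: z :: v) with
            | none => none
            | some c => some (x ++ ", " ++ c) from rfl,
          ih (by simp)]
        have hlen : 1 < (y :: z :: v).length := by simp
        have hlen2 : 1 < (x :: y :: z :: v).length := by simp
        simp only [hlen, hlen2, if_pos, pv_slice_dropLast]
        have hd : (x :: y :: z :: v).dropLast = x :: (y :: z :: v).dropLast := rfl
        rw [hd]
        have hdj : ∃ a u', (y :: z :: v).dropLast = a :: u' := by
          cases v with
          | nil => exact ⟨y, [], rfl⟩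
          | cons w v' => exact ⟨y, (z :: w :: v').dropLast, rfl⟩
        obtain ⟨a, u', hau⟩ := hdj
        rw [hau, pv_join_cons₂, ← hau]
        have hlast : PySem.List.pyGetD (x :: y :: z :: v) (-1) ""
            = PySem.List.pyGetD (y :: z :: v) (-1) "" := by
          rw [pv_getD_last, pv_getD_last, List.getLast_cons (by simp)]
        rw [hlast]
        simp [String.append_assoc]

-- the one-shot concatenation of the reversed segment list is exactly the core string
lemma pv_core_join (conj : String) (c : List String) (h : c ≠ []) :
    pvCore conj c = some (PySem.Str.join "" (pvSegs conj c).reverse) := by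
  induction c with
  | nil => exact absurd rfl h
  | cons x t ih =>
    cases t with
    | nil => simp [pvCore, pvSegs, pv_join_singleton]
    | cons y u =>
      have hy : pvCore conj (y :: u) = some (PySem.Str.join "" (pvSegs conj (y :: u)).reverse) :=
        ih (by simp)
      cases u with
      | nil =>
        simp only [pvCore, pvSegs]
        simp [pv_join_empty_cons, pv_join_singleton, String.append_assoc]
      | cons z v =>
        rw [show pvCore conj (x :: y :: z :: v) =
            (match pvCore conj (y :: z :: v) with
              | none => none
              | some c => some (x ++ ", " ++ c)) from rfl, hy]
        have hseg : pvSegs conj (x :: y :: z :: v) = pvSegs conj (y :: z :: v) ++ [", ", x] := by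
          simp [pvSegs]
        rw [hseg]
        simp [pv_join_empty_cons, String.append_assoc]

lemma pv_getD_style (lang : String) :
    pvStyle.getD lang pvIT =
      if lang = "es" then (" y ", "Outfit con ", "Outfit equilibrado.")
      else if lang = "en" then (" and ", "Outfit with ", "Well-balanced outfit.")
      else pvIT := by
  unfold pvStyle
  rw [PySem.Dict.getD_insert, PySem.Dict.getD_insert]
  split_ifs <;> simp [PySem.Dict.getD_empty]

-- A's body equals "prefix ++ core ++ ." / empty message, with the table entry for lang
lemma pv_body_eq (c : List String) (lang : String) :
    pvBodyA c lang =
      (match pvCore (pvStyle.getD lang pvIT).1 c with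
        | none => (pvStyle.getD lang pvIT).2.2
        | some s => (pvStyle.getD lang pvIT).2.1 ++ s ++ ".") := by
  rw [pv_getD_style]
  by_cases h2 : lang = "es"
  · subst h2
    rw [if_pos rfl]
    cases c with
    | nil => simp [pvBodyA, pvCore]
    | cons a t =>
      rw [pv_core_sentence " y " (a :: t) (by simp)]
      simp [pvBodyA, String.append_assoc]
  · rw [if_neg h2]
    by_cases h1 : lang = "en"
    · subst h1
      rw [if_pos rfl]
      cases c with
      | nil => simp [pvBodyA, pvCore]
      | cons a t =>
        rw [pv_core_sentence " and " (a :: t) (by simp)]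
        simp [pvBodyA, String.append_assoc]
    · rw [if_neg h1]
      cases c with
      | nil => simp [pvBodyA, h1, h2, pvIT, pvCore]
      | cons a t =>
        cases t with
        | nil =>
          simp [pvBodyA, h1, h2, pvIT, pvCore, PySem.List.pyGetD, PySem.List.pyGet?,
            PySem.List.pyIdx?]
        | cons b u =>
          cases u with
          | nil =>
            simp [pvBodyA, h1, h2, pvIT, pvCore, PySem.List.pyGetD,
              PySem.List.pyGet?, PySem.List.pyIdx?, String.append_assoc]
          | cons d v =>
            rw [show (pvIT.1 : String) = " e " from rfl,
              pv_core_sentence " e " (a :: b :: d :: v) (by simp)]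
            simp [pvBodyA, h1, h2, pvIT, String.append_assoc]

-- ===== VERDICT =====
theorem fallback_description_spec : Claim_equal_fallback_description := by
  intro parts lang _
  unfold Spec_fallback_description
  have hA : fallback_description parts lang = pvBodyA (pvCleanA parts) lang := rfl
  rw [hA]
  show pvBodyA (pvCleanA parts) lang =
    (let st := parts.reverse.foldl
        (fun (st : List String × Nat) p =>
          let s := simplify_alt p
          if s == "" then st
          else
            let segs := if st.2 == 1 then st.1 ++ [(pvStyle.getD lang pvIT).1]
              else if 1 < st.2 then st.1 ++ [", "] else st.1
            (segs ++ [s], st.2 + 1))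
        ([], 0)
     if st.1 == [] then (pvStyle.getD lang pvIT).2.2
     else PySem.Str.join "" ((st.1 ++ [(pvStyle.getD lang pvIT).2.1]).reverse ++ ["."]))
  rw [pv_fold_filter]
  have hrev : ((parts.reverse.map simplify_alt).filter (fun s => !(s == "")))
      = (pvCleanA parts).reverse := by
    rw [pv_cleanA_eq]
    simp
  rw [hrev, List.foldl_reverse]
  have hfr : (pvCleanA parts).foldr
      (fun s st => pvStep (pvStyle.getD lang pvIT).1 st s) ([], 0)
      = (pvSegs (pvStyle.getD lang pvIT).1 (pvCleanA parts), (pvCleanA parts).length) :=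
    pv_foldr_segs _ _
  rw [hfr, pv_body_eq]
  cases hc : pvCleanA parts with
  | nil => simp [pvCore, pvSegs]
  | cons a t =>
    rw [pv_core_join _ _ (by simp)]
    rw [if_neg (by simp [pv_segs_ne_nil])]
    rw [List.reverse_append, List.reverse_singleton, List.singleton_append,
      List.cons_append, pv_join_empty_cons, pv_join_empty_append_dot]
    simp [String.append_assoc]
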